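-- pv_equiv track=rewrite | github.com/myrzh/ict-homework | grade11/3_10/main.py | func_1_2_3
-- ===== SOURCE A (Python) =====
-- def func_1_2_3(r):
--     is_negative = False
--     if r < 0:
--         r = -r
--         is_negative = True
--     r = bin(r)[2:]
--     r += str(sum(int(i) for i in r) % 2)
--     r += str(sum(int(i) for i in r) % 2)
--     if is_negative:
--         return -int(r, 2)
--     return int(r, 2)
-- ===== SOURCE B (Python) =====
-- def func_1_2_3(r):
--     n = -r if r < 0 else r
--     ones = 0
--     m = n
--     while m:
--         ones += m & 1
--         m >>= 1
--     res = 4 * n + 2 * (ones % 2)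
--     return -res if r < 0 else res
-- ===== Notes on version B (the rewrite author's own statement) =====
-- stated objective: simpler
-- what changed: Replaces the binary-string build / string digit-sum / int(.,2) round-trip with a popcount loop and a closed arithmetic form (shift the magnitude left twice and add the doubled parity; the second appended parity bit is provably always zero).
import Mathlib
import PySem

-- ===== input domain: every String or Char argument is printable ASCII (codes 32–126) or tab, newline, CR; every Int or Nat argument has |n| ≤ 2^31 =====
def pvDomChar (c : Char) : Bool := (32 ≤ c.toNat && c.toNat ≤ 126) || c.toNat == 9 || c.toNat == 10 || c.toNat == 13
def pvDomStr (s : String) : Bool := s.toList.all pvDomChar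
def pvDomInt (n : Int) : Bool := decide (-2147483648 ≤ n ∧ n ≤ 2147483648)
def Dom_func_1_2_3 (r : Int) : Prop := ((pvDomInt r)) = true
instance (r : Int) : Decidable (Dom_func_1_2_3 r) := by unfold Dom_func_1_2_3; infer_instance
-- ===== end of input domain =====

-- B replaces A's binary-string build + digit-sum + int(.,2) round-trip by a popcount loop
-- and the closed form 4*n + 2*(popcount n % 2); the second appended parity bit is always 0.

-- ===== PORT A =====
-- bin(r)[2:] for r > 0, as a list of '0'/'1' chars (hand port of Python's bin; exact on Nat)
def pvBits (n : Nat) : List Char :=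
  if h : n = 0 then []
  else pvBits (n / 2) ++ [if n % 2 = 1 then '1' else '0']
decreasing_by exact Nat.div_lt_self (Nat.pos_of_ne_zero h) (by norm_num)

-- int(i) for a binary digit char (only '0'/'1' occur)
def pvCharVal (c : Char) : Nat := if c = '1' then 1 else 0

-- sum(int(i) for i in r)
def pvDigitSum (l : List Char) : Nat := (l.map pvCharVal).sum

-- str(d) for d ∈ {0,1}
def pvDigitChar (d : Nat) : Char := if d = 1 then '1' else '0'

-- int(r, 2): hand port of base-2 string-to-int conversion (exact for '0'/'1' strings)
def pvIntOfBin (l : List Char) : Int := l.foldl (fun acc c => 2 * acc + (pvCharVal c : Int)) 0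

def func_1_2_3 (r : Int) : Int :=
  let isNeg := decide (r < 0)
  let n : Nat := (if r < 0 then -r else r).toNat
  let s := if n = 0 then ['0'] else pvBits n          -- bin(r)[2:]
  let s1 := s ++ [pvDigitChar (pvDigitSum s % 2)]
  let s2 := s1 ++ [pvDigitChar (pvDigitSum s1 % 2)]
  if isNeg then -pvIntOfBin s2 else pvIntOfBin s2

-- ===== PORT B =====
-- while m: ones += m & 1; m >>= 1
def pvPopcnt (m : Nat) : Nat :=
  if h : m = 0 then 0
  else pvPopcnt (m / 2) + m % 2
decreasing_by exact Nat.div_lt_self (Nat.pos_of_ne_zero h) (by norm_num)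

def func_1_2_3_alt (r : Int) : Int :=
  let n : Nat := (if r < 0 then -r else r).toNat
  let res : Int := 4 * (n : Int) + 2 * ((pvPopcnt n % 2 : Nat) : Int)
  if r < 0 then -res else res

-- ===== PRECONDITION & SPEC =====
def Spec_func_1_2_3 (r : Int) (out : Int) : Prop := out = func_1_2_3_alt r
instance (r : Int) (out : Int) : Decidable (Spec_func_1_2_3 r out) := by unfold Spec_func_1_2_3; infer_instance

-- ===== CLAIM (what is proved, stated in full; the proofs are below) =====
def Claim_equal_func_1_2_3 : Prop := ∀ (r : Int), Dom_func_1_2_3 r → Spec_func_1_2_3 r (func_1_2_3 r)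

-- ===== LEMMAS AND PROOFS =====

lemma pvIntOfBin_append (l : List Char) (c : Char) :
    pvIntOfBin (l ++ [c]) = 2 * pvIntOfBin l + (pvCharVal c : Int) := by
  simp [pvIntOfBin, List.foldl_append]

lemma pvDigitSum_append (l : List Char) (c : Char) :
    pvDigitSum (l ++ [c]) = pvDigitSum l + pvCharVal c := by
  simp [pvDigitSum]

lemma pvCharVal_digitChar (d : Nat) (h : d ≤ 1) : pvCharVal (pvDigitChar d) = d := by
  interval_cases d <;> simp [pvCharVal, pvDigitChar]

lemma pvBits_val (n : Nat) : pvIntOfBin (pvBits n) = n := by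
  induction n using Nat.strong_induction_on with
  | _ n ih =>
    rw [pvBits]
    by_cases h : n = 0
    · simp [h, pvIntOfBin]
    · have := ih (n / 2) (Nat.div_lt_self (Nat.pos_of_ne_zero h) (by norm_num))
      simp only [h, dif_neg, not_false_iff, pvIntOfBin_append, this]
      have h2 := Nat.div_add_mod n 2
      rcases Nat.mod_two_eq_zero_or_one n with hm | hm <;>
        simp [hm, pvCharVal] <;> omega

lemma pvBits_sum (n : Nat) : pvDigitSum (pvBits n) = pvPopcnt n := by
  induction n using Nat.strong_induction_on with
  | _ n ih =>
    rw [pvBits, pvPopcnt]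
    by_cases h : n = 0
    · simp [h, pvDigitSum]
    · have := ih (n / 2) (Nat.div_lt_self (Nat.pos_of_ne_zero h) (by norm_num))
      simp only [h, dif_neg, not_false_iff, pvDigitSum_append, this]
      rcases Nat.mod_two_eq_zero_or_one n with hm | hm <;> simp [hm, pvCharVal]

-- the core identity on the nonnegative magnitude
lemma pv_core (n : Nat) :
    (let s := if n = 0 then ['0'] else pvBits n
     let s1 := s ++ [pvDigitChar (pvDigitSum s % 2)]
     let s2 := s1 ++ [pvDigitChar (pvDigitSum s1 % 2)]
     pvIntOfBin s2) = 4 * (n : Int) + 2 * ((pvPopcnt n % 2 : Nat) : Int) := by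
  simp only
  set s := if n = 0 then ['0'] else pvBits n with hs
  have hval : pvIntOfBin s = n := by
    by_cases h : n = 0
    · simp [hs, h, pvIntOfBin, pvCharVal]
    · simp [hs, h, pvBits_val]
  have hsum : pvDigitSum s = pvPopcnt n := by
    by_cases h : n = 0
    · simp [hs, h, pvDigitSum, pvCharVal, pvPopcnt]
    · simp [hs, h, pvBits_sum]
  have h1 : pvDigitSum s % 2 ≤ 1 := Nat.lt_succ_iff.mp (Nat.mod_lt _ (by norm_num))
  have hsum1 : pvDigitSum (s ++ [pvDigitChar (pvDigitSum s % 2)]) % 2 = 0 := by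
    rw [pvDigitSum_append, pvCharVal_digitChar _ h1]
    omega
  rw [pvIntOfBin_append, hsum1, pvIntOfBin_append, hval,
      pvCharVal_digitChar _ h1, pvCharVal_digitChar _ (by norm_num)]
  rw [hsum]
  push_cast
  ring

-- ===== VERDICT (by name: the statement is the Claim_ definition above) =====
theorem func_1_2_3_spec : Claim_equal_func_1_2_3 := by
  intro r _
  have key := pv_core ((if r < 0 then -r else r).toNat)
  simp only at key
  unfold Spec_func_1_2_3 func_1_2_3 func_1_2_3_alt
  by_cases h : r < 0 <;>
    simp only [h, decide_true, decide_false, Bool.false_eq_true,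
      if_true, if_false] at key ⊢ <;>
    rw [key]
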